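-- pv_equiv track=rewrite | github.com/gLmatos35/LECI | 3oAno/1oSemestre/IA/testes.py | existe
-- ===== SOURCE A (Python) =====
-- def existe(lista, elem):
--     newList = lista[:]
--     if len(newList) == 0:
--         return False
--     if elem == newList[0]:
--         return True
--     else:
--         return existe(newList[1:],elem)
-- ===== SOURCE B (Python) =====
-- def existe(lista, elem):
--     for x in lista:
--         if x == elem:
--             return True
--     return False
-- ===== Notes on version B (the rewrite author's own statement) =====
-- stated objective: idiomatic
-- what changed: Replaced the copy-and-slice recursion with a flat iterative for-loop that returns on the first match.
import Mathlib
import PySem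

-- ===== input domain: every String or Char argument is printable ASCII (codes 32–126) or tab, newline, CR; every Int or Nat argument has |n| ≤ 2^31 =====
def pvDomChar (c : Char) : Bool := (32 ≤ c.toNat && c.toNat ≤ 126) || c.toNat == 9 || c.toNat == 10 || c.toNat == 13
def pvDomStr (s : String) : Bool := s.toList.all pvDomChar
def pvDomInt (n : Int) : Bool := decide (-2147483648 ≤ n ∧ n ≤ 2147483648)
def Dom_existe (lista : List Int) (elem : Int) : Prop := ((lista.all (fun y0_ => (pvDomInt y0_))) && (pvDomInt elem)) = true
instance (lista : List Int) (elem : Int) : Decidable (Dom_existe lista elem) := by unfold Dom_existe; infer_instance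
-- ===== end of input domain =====

-- B replaces A's copy-and-slice recursion by a flat iterative first-match loop (idiomatic).

-- ===== PORT A =====
-- Literal port of A: copy the list (lista[:]), empty → False, head match → True, else recurse on newList[1:].
def existe (lista : List Int) (elem : Int) : Bool :=
  let newList := PySem.List.slice lista none none
  if newList.length == 0 then false
  else if elem == newList[0]! then true
  else existe (PySem.List.slice newList (some 1) none) elem
termination_by lista.length
decreasing_by
  simp only [newList, PySem.List.slice_none_none, PySem.List.slice_from_one, List.length_tail, beq_iff_eq] at *
  omega

-- ===== PORT B =====
-- Port of B: iterate over the elements, returning at the first match; false after the loop.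
def existeLoop (xs : List Int) (elem : Int) : Bool :=
  match xs with
  | [] => false
  | x :: rest => if x == elem then true else existeLoop rest elem

def existe_alt (lista : List Int) (elem : Int) : Bool := existeLoop lista elem

-- ===== PRECONDITION & SPEC =====
def Spec_existe (lista : List Int) (elem : Int) (out : Bool) : Prop := out = existe_alt lista elem
instance (lista : List Int) (elem : Int) (out : Bool) : Decidable (Spec_existe lista elem out) := by unfold Spec_existe; infer_instance

-- ===== CLAIM (what is proved, stated in full; the proofs are below) =====
def Claim_equal_existe : Prop := ∀ (lista : List Int) (elem : Int), Dom_existe lista elem → Spec_existe lista elem (existe lista elem)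

-- ===== LEMMAS AND PROOFS =====
theorem existe_eq_alt (lista : List Int) (elem : Int) :
    existe lista elem = existe_alt lista elem := by
  induction lista with
  | nil =>
      rw [existe]
      simp [existe_alt, existeLoop, PySem.List.slice_none_none]
  | cons x rest ih =>
      rw [existe]
      simp only [PySem.List.slice_none_none, PySem.List.slice_from_one]
      simp only [List.tail_cons, ih]
      simp only [existe_alt, existeLoop]
      by_cases h : x = elem
      · simp [h]
      · have h' : ¬ elem = x := fun he => h he.symm
        simp [h, h']

-- ===== VERDICT (by name: the statement is the Claim_ definition above) =====
theorem existe_spec : Claim_equal_existe := by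
  intro lista elem _
  unfold Spec_existe
  exact existe_eq_alt lista elem
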